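-- pv_equiv track=rewrite | github.com/DaehyunY00/Domain-Adaptive-Progressive-Distillation | src/dapd/pruning.py | _layer_block_prefix
-- ===== SOURCE A (Python) =====
-- def _layer_block_prefix(module_name: str) -> str:
--     suffixes = (
--         ".self_attn.q_proj",
--         ".self_attn.k_proj",
--         ".self_attn.v_proj",
--         ".self_attn.o_proj",
--         ".attention.q_proj",
--         ".attention.k_proj",
--         ".attention.v_proj",
--         ".attention.o_proj",
--         ".mlp.gate_proj",
--         ".mlp.up_proj",
--         ".mlp.down_proj",
--     )
--     for suffix in suffixes:
--         if module_name.endswith(suffix):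
--             return module_name[: -len(suffix)]
--
--     if "." in module_name:
--         return module_name.rsplit(".", 1)[0]
--     return module_name
-- ===== SOURCE B (Python) =====
-- _PAIRS = {
--     ("self_attn", "q_proj"), ("self_attn", "k_proj"),
--     ("self_attn", "v_proj"), ("self_attn", "o_proj"),
--     ("attention", "q_proj"), ("attention", "k_proj"),
--     ("attention", "v_proj"), ("attention", "o_proj"),
--     ("mlp", "gate_proj"), ("mlp", "up_proj"), ("mlp", "down_proj"),
-- }
--
--
-- def _layer_block_prefix(module_name: str) -> str:
--     parts = module_name.split(".")
--     if len(parts) >= 3 and (parts[-2], parts[-1]) in _PAIRS: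
--         return ".".join(parts[:-2])
--     if len(parts) >= 2:
--         return ".".join(parts[:-1])
--     return module_name
-- ===== Notes on version B (the rewrite author's own statement) =====
-- stated objective: alternative
-- what changed: B tokenizes the name once at the dot separators and decides via one membership test of the (penultimate, last) token pair in a precomputed set, then joins the kept tokens, instead of A's ordered scan of 11 full-string endswith suffix checks plus rsplit.
import Mathlib
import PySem

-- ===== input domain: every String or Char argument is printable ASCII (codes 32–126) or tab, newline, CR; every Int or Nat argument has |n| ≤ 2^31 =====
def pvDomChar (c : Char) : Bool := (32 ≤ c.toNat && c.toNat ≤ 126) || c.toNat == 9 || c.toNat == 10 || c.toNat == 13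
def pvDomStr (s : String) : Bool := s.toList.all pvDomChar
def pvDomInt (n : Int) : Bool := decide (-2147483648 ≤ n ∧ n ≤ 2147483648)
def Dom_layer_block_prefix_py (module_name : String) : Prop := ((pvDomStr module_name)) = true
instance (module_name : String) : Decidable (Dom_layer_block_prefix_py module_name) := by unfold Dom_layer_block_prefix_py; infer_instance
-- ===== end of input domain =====

-- B replaces A's ordered scan of 11 full-string endswith suffix checks (plus rsplit) by one
-- dot-split pass, a set-membership test on the (penultimate, last) token pair, and a join.

-- ===== PORT A =====
-- A's tuple of suffixes, in A's order
def pvSuffixesA : List (List Char) :=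
  [".self_attn.q_proj".toList, ".self_attn.k_proj".toList, ".self_attn.v_proj".toList,
   ".self_attn.o_proj".toList, ".attention.q_proj".toList, ".attention.k_proj".toList,
   ".attention.v_proj".toList, ".attention.o_proj".toList, ".mlp.gate_proj".toList,
   ".mlp.up_proj".toList, ".mlp.down_proj".toList]

-- 'for suffix in suffixes: if module_name.endswith(suffix): return module_name[:-len(suffix)]'
-- (early return modelled as Option)
def pvLoopA (s : List Char) : List (List Char) → Option (List Char)
  | [] => none
  | suf :: rest =>
      if PySem.Chars.endswith s suf then
        some (PySem.List.slice s none (some (-(suf.length : Int))))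
      else pvLoopA s rest

-- hand port of module_name.rsplit(".", 1)[0]: scan from the right (the reversed string),
-- cut at the first '.' found; exact whenever "." occurs in the string, which is the only
-- case in which A reaches the rsplit call
def pvRsplitAux : List Char → List Char
  | [] => []
  | c :: rest => if c = '.' then rest.reverse else pvRsplitAux rest

def layer_block_prefix_py (module_name : String) : String :=
  let s := module_name.toList
  match pvLoopA s pvSuffixesA with
  | some r => String.ofList r
  | none =>
      if PySem.Chars.isIn ['.'] s then String.ofList (pvRsplitAux s.reverse)
      else module_name

-- ===== PORT B =====
-- B's set literal _PAIRS of (penultimate, last) token pairs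
def pvPairsB : PySem.Set (List Char × List Char) := PySem.Set.ofList
  [("self_attn".toList, "q_proj".toList), ("self_attn".toList, "k_proj".toList),
   ("self_attn".toList, "v_proj".toList), ("self_attn".toList, "o_proj".toList),
   ("attention".toList, "q_proj".toList), ("attention".toList, "k_proj".toList),
   ("attention".toList, "v_proj".toList), ("attention".toList, "o_proj".toList),
   ("mlp".toList, "gate_proj".toList), ("mlp".toList, "up_proj".toList),
   ("mlp".toList, "down_proj".toList)]

def layer_block_prefix_py_alt (module_name : String) : String :=
  let parts := PySem.Chars.splitOn module_name.toList ['.']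
  -- parts[-2] / parts[-1] are guarded by 'len(parts) >= 3' in Source B, so the defaults are dead
  if 3 ≤ parts.length ∧
      pvPairsB.contains
        ((PySem.List.pyGet? parts (-2)).getD [], (PySem.List.pyGet? parts (-1)).getD []) = true then
    String.ofList (PySem.Chars.join ['.'] (PySem.List.slice parts none (some (-2))))
  else if 2 ≤ parts.length then
    String.ofList (PySem.Chars.join ['.'] (PySem.List.slice parts none (some (-1))))
  else module_name

-- ===== PRECONDITION & SPEC =====
def Spec_layer_block_prefix_py (module_name : String) (out : String) : Prop := out = layer_block_prefix_py_alt module_name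
instance (module_name : String) (out : String) : Decidable (Spec_layer_block_prefix_py module_name out) := by unfold Spec_layer_block_prefix_py; infer_instance

-- ===== CLAIM (what is proved, stated in full; the proofs are below) =====
def Claim_equal_layer_block_prefix_py : Prop := ∀ (module_name : String), Dom_layer_block_prefix_py module_name → Spec_layer_block_prefix_py module_name (layer_block_prefix_py module_name)

-- ===== LEMMAS AND PROOFS =====

-- reference model of str.split(".") on char lists
def pvModel : List Char → List Char → List (List Char)
  | [], cur => [cur.reverse]
  | c :: rest, cur => if c = '.' then cur.reverse :: pvModel rest [] else pvModel rest (c :: cur)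

lemma pvModel_cons_dot (rest cur : List Char) :
    pvModel ('.' :: rest) cur = cur.reverse :: pvModel rest [] := by simp [pvModel]

lemma pvModel_cons_ne (c : Char) (rest cur : List Char) (hc : c ≠ '.') :
    pvModel (c :: rest) cur = pvModel rest (c :: cur) := by simp [pvModel, hc]

-- '.'.join on char-list parts
def pvJoin : List (List Char) → List Char
  | [] => []
  | [x] => x
  | x :: y :: rest => x ++ '.' :: pvJoin (y :: rest)

lemma pvGo_eq (fuel : Nat) (l cur : List Char) (acc : List (List Char)) (h : l.length < fuel) :
    PySem.Chars.splitOn.go ['.'] fuel l cur acc = acc.reverse ++ pvModel l cur := by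
  induction fuel generalizing l cur acc with
  | zero => omega
  | succ n ih =>
    cases l with
    | nil => simp [PySem.Chars.splitOn.go, pvModel]
    | cons c rest =>
      have hlt : rest.length < n := by simpa using Nat.lt_of_succ_lt_succ h
      by_cases hc : c = '.'
      · subst hc
        rw [show PySem.Chars.splitOn.go ['.'] (n+1) ('.'::rest) cur acc
            = PySem.Chars.splitOn.go ['.'] n rest [] (cur.reverse :: acc) from by
          simp [PySem.Chars.splitOn.go, List.isPrefixOf]]
        rw [ih _ _ _ hlt]
        simp [pvModel]
      · rw [show PySem.Chars.splitOn.go ['.'] (n+1) (c::rest) cur acc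
            = PySem.Chars.splitOn.go ['.'] n rest (c :: cur) acc from by
          simp [PySem.Chars.splitOn.go, List.isPrefixOf, Ne.symm hc]]
        rw [ih _ _ _ hlt]
        simp [pvModel, hc]

lemma pvSplitOn_eq (s : List Char) : PySem.Chars.splitOn s ['.'] = pvModel s [] := by
  unfold PySem.Chars.splitOn
  rw [pvGo_eq _ _ _ _ (by omega)]
  simp

lemma pvModel_ne_nil (l cur : List Char) : pvModel l cur ≠ [] := by
  induction l generalizing cur with
  | nil => simp [pvModel]
  | cons c rest ih =>
    by_cases hc : c = '.'
    · simp [pvModel, hc]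
    · simp [pvModel, hc]
      exact ih _

lemma pvModel_free (l cur : List Char) (hcur : '.' ∉ cur) :
    ∀ x ∈ pvModel l cur, '.' ∉ x := by
  induction l generalizing cur with
  | nil => simpa [pvModel] using hcur
  | cons c rest ih =>
    by_cases hc : c = '.'
    · subst hc
      rw [pvModel_cons_dot]
      simp only [List.mem_cons]
      rintro x (rfl | hx)
      · simpa using hcur
      · exact ih [] (by simp) x hx
    · rw [pvModel_cons_ne _ _ _ hc]
      exact ih (c :: cur) (by simp [hcur, Ne.symm hc])

lemma pvJoin_cons_cons (x y : List Char) (rest : List (List Char)) :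
    pvJoin (x :: y :: rest) = x ++ '.' :: pvJoin (y :: rest) := rfl

lemma pvModel_join (l cur : List Char) : pvJoin (pvModel l cur) = cur.reverse ++ l := by
  induction l generalizing cur with
  | nil => simp [pvModel, pvJoin]
  | cons c rest ih =>
    by_cases hc : c = '.'
    · subst hc
      rw [pvModel_cons_dot]
      obtain ⟨z, zs, hz⟩ : ∃ z zs, pvModel rest [] = z :: zs := by
        cases h : pvModel rest [] with
        | nil => exact absurd h (pvModel_ne_nil _ _)
        | cons z zs => exact ⟨z, zs, rfl⟩
      rw [hz, pvJoin_cons_cons, ← hz, ih]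
      simp
    · rw [pvModel_cons_ne _ _ _ hc, ih]
      simp

lemma pvJoin_eq_intercalate (parts : List (List Char)) :
    PySem.Chars.join ['.'] parts = pvJoin parts := by
  unfold PySem.Chars.join
  induction parts with
  | nil => simp [pvJoin, List.intercalate, List.intersperse]
  | cons x rest ih =>
    cases rest with
    | nil => simp [pvJoin, List.intercalate, List.intersperse]
    | cons y zs =>
      rw [pvJoin_cons_cons, ← ih]
      simp [List.intercalate, List.intersperse]

lemma pvJoin_concat (as : List (List Char)) (y : List Char) (h : as ≠ []) :
    pvJoin (as ++ [y]) = pvJoin as ++ '.' :: y := by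
  induction as with
  | nil => exact absurd rfl h
  | cons x rest ih =>
    cases rest with
    | nil => simp [pvJoin]
    | cons z zs =>
      have hstep : pvJoin ((x :: z :: zs) ++ [y]) = x ++ '.' :: pvJoin (z :: (zs ++ [y])) := rfl
      have ih' : pvJoin (z :: (zs ++ [y])) = pvJoin (z :: zs) ++ '.' :: y := by
        rw [← List.cons_append]; exact ih (by simp)
      rw [hstep, ih']
      show _ = (x ++ '.' :: pvJoin (z :: zs)) ++ '.' :: y
      simp

-- prefix alignment at the first '.'
lemma pvAlign (q p p' q' : List Char) (hp : '.' ∉ p) (hq : '.' ∉ q)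
    (h : p ++ '.' :: p' <+: q ++ '.' :: q') : p = q ∧ p' <+: q' := by
  induction q generalizing p with
  | nil =>
    cases p with
    | nil => simpa using h
    | cons a as =>
      exfalso
      simp only [List.nil_append, List.cons_append] at h
      obtain ⟨t, ht⟩ := h
      simp only [List.cons_append] at ht
      have : a = '.' := by injection ht
      exact hp (by simp [this])
  | cons b bs ih =>
    cases p with
    | nil =>
      exfalso
      simp only [List.nil_append, List.cons_append] at h
      obtain ⟨t, ht⟩ := h
      have : '.' = b := by injection ht
      exact hq (by simp [← this])
    | cons a as =>
      simp only [List.cons_append, List.cons_prefix_cons] at h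
      obtain ⟨rfl, h2⟩ := h
      obtain ⟨h3, h4⟩ := ih as (fun hm => hp (List.mem_cons_of_mem _ hm))
        (fun hm => hq (List.mem_cons_of_mem _ hm)) h2
      exact ⟨by rw [h3], h4⟩

-- a known two-token suffix matches exactly when the last two tokens are that pair
lemma pvEnds_iff (w x y u v : List Char) (hx : '.' ∉ x) (hy : '.' ∉ y)
    (hu : '.' ∉ u) (hv : '.' ∉ v) :
    (('.' :: u ++ '.' :: v) <:+ (w ++ ('.' :: x ++ '.' :: y))) ↔ (u = x ∧ v = y) := by
  constructor
  · intro h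
    rw [← List.reverse_prefix] at h
    simp only [List.reverse_append, List.reverse_cons] at h
    have h' : v.reverse ++ '.' :: (u.reverse ++ ['.'])
        <+: y.reverse ++ '.' :: (x.reverse ++ ('.' :: w.reverse)) := by
      simpa [List.append_assoc] using h
    obtain ⟨hvy, h2⟩ := pvAlign y.reverse v.reverse _ _
      (by simpa using hv) (by simpa using hy) h'
    have h2' : u.reverse ++ '.' :: ([] : List Char) <+: x.reverse ++ '.' :: w.reverse := by
      simpa using h2
    obtain ⟨hux, _⟩ := pvAlign x.reverse u.reverse _ _
      (by simpa using hu) (by simpa using hx) h2'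
    exact ⟨by simpa using congrArg List.reverse hux, by simpa using congrArg List.reverse hvy⟩
  · rintro ⟨rfl, rfl⟩
    exact List.suffix_append w _

-- A's loop returns nothing when the name holds at most one dot
lemma pvLoopA_none (s : List Char) (L : List (List Char))
    (hL : ∀ suf ∈ L, 2 ≤ suf.count '.') (hs : s.count '.' ≤ 1) : pvLoopA s L = none := by
  induction L with
  | nil => rfl
  | cons suf rest ih =>
    have hend : PySem.Chars.endswith s suf = false := by
      rw [Bool.eq_false_iff]
      intro htrue
      have hsuf : suf <:+ s := (PySem.Chars.endswith_iff s suf).1 htrue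
      have hcnt : suf.count '.' ≤ s.count '.' := hsuf.sublist.count_le '.'
      have := hL suf (by simp)
      omega
    simp only [pvLoopA, hend, Bool.false_eq_true, if_neg, not_false_iff]
    exact ih (fun t ht => hL t (by simp [ht]))

-- the pair form of A's suffix tuple
def pvPairList : List (List Char × List Char) :=
  [("self_attn".toList, "q_proj".toList), ("self_attn".toList, "k_proj".toList),
   ("self_attn".toList, "v_proj".toList), ("self_attn".toList, "o_proj".toList),
   ("attention".toList, "q_proj".toList), ("attention".toList, "k_proj".toList),
   ("attention".toList, "v_proj".toList), ("attention".toList, "o_proj".toList),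
   ("mlp".toList, "gate_proj".toList), ("mlp".toList, "up_proj".toList),
   ("mlp".toList, "down_proj".toList)]

lemma pvSuffixesA_eq :
    pvSuffixesA = pvPairList.map (fun p => '.' :: p.1 ++ '.' :: p.2) := by decide

-- A's loop on a name whose last two tokens are x, y
lemma pvLoopA_pairs (w x y : List Char) (L : List (List Char × List Char))
    (hx : '.' ∉ x) (hy : '.' ∉ y)
    (hL : ∀ p ∈ L, '.' ∉ p.1 ∧ '.' ∉ p.2) :
    pvLoopA (w ++ ('.' :: x ++ '.' :: y)) (L.map (fun p => '.' :: p.1 ++ '.' :: p.2))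
      = if (x, y) ∈ L then some w else none := by
  induction L with
  | nil => simp [pvLoopA]
  | cons p rest ih =>
    obtain ⟨u, v⟩ := p
    have hu := (hL (u, v) (by simp)).1
    have hv := (hL (u, v) (by simp)).2
    by_cases huv : u = x ∧ v = y
    · obtain ⟨rfl, rfl⟩ := huv
      have hend : PySem.Chars.endswith (w ++ ('.' :: u ++ '.' :: v)) ('.' :: u ++ '.' :: v)
          = true := (PySem.Chars.endswith_iff _ _).2 (List.suffix_append w _)
      simp only [List.map_cons, pvLoopA, hend, if_pos]
      rw [PySem.List.slice_to_neg_natCast _ _ (by simp)]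
      have hlen : (w ++ ('.' :: u ++ '.' :: v)).length - ('.' :: u ++ '.' :: v).length
          = w.length := by simp
      rw [hlen, List.take_left]
      simp
    · have hend : PySem.Chars.endswith (w ++ ('.' :: x ++ '.' :: y)) ('.' :: u ++ '.' :: v)
          = false := by
        rw [Bool.eq_false_iff]
        intro htrue
        have hsuf : ('.' :: u ++ '.' :: v) <:+ (w ++ ('.' :: x ++ '.' :: y)) :=
          (PySem.Chars.endswith_iff _ _).1 htrue
        exact huv ((pvEnds_iff w x y u v hx hy hu hv).1 hsuf)
      simp only [List.map_cons, pvLoopA, hend, Bool.false_eq_true, if_neg, not_false_iff]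
      rw [ih (fun q hq => hL q (by simp [hq]))]
      by_cases hr : (x, y) ∈ rest
      · simp [hr, List.mem_cons_of_mem _ hr]
      · have hnot : (x, y) ∉ (u, v) :: rest := by
          simp only [List.mem_cons, Prod.mk.injEq]
          rintro (⟨rfl, rfl⟩ | h)
          · exact huv ⟨rfl, rfl⟩
          · exact hr h
        simp [hr, hnot]

-- the hand rsplit helper cuts the reversed string at its first '.'
lemma pvRsplitAux_eq (z t : List Char) (hz : '.' ∉ z) :
    pvRsplitAux (z ++ '.' :: t) = t.reverse := by
  induction z with
  | nil => simp [pvRsplitAux]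
  | cons c cs ih =>
    have hc : c ≠ '.' := fun h => hz (by simp [h])
    simp only [List.cons_append, pvRsplitAux, if_neg hc]
    exact ih (fun h => hz (List.mem_cons_of_mem _ h))

lemma pvGet_neg2 {α : Type} (ps : List α) (x y : α) :
    PySem.List.pyGet? (ps ++ [x, y]) (-2) = some x := by
  have h0 : PySem.List.pyIdx? (ps ++ [x, y]).length (-2) = some ps.length := by
    simp [PySem.List.pyIdx?]
  rw [PySem.List.pyGet?, h0]
  simp

lemma pvGet_neg1 {α : Type} (ps : List α) (x y : α) :
    PySem.List.pyGet? (ps ++ [x, y]) (-1) = some y := by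
  have h0 : PySem.List.pyIdx? (ps ++ [x, y]).length (-1) = some (ps.length + 1) := by
    simp [PySem.List.pyIdx?]
  rw [PySem.List.pyGet?, h0]
  simp

lemma pvContains_iff (x y : List Char) :
    (pvPairsB.contains (x, y) = true) ↔ (x, y) ∈ pvPairList := by
  rw [PySem.Set.contains_iff]
  unfold pvPairsB
  rw [PySem.Set.mem_ofList]
  rfl

lemma pvMain (module_name : String) :
    layer_block_prefix_py module_name = layer_block_prefix_py_alt module_name := by
  unfold layer_block_prefix_py layer_block_prefix_py_alt
  dsimp only
  rw [pvSplitOn_eq]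
  set s := module_name.toList with hsdef
  have hfree : ∀ x ∈ pvModel s [], '.' ∉ x := pvModel_free s [] (by simp)
  have hjoin : pvJoin (pvModel s []) = s := by simpa using pvModel_join s []
  have hpairfree : ∀ p ∈ pvPairList, '.' ∉ p.1 ∧ '.' ∉ p.2 := by decide
  rcases (pvModel s []).eq_nil_or_concat with hnil | ⟨qs, y, hqs⟩
  · exact absurd hnil (pvModel_ne_nil s [])
  · simp only [List.concat_eq_append] at hqs
    have hy : '.' ∉ y := hfree y (hqs ▸ by simp)
    rcases qs.eq_nil_or_concat with hqnil | ⟨zs, x, hzs⟩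
    · -- one token: no dot in s
      subst hqnil
      have hs1 : s = y := by rw [← hjoin, hqs]; rfl
      have hsc : s.count '.' ≤ 1 := by
        rw [hs1, List.count_eq_zero.2 hy]; omega
      rw [pvLoopA_none s pvSuffixesA (by decide) hsc]
      have hin : PySem.Chars.isIn ['.'] s = false := by
        cases h : PySem.Chars.isIn ['.'] s
        · rfl
        · exfalso
          have := (PySem.Chars.isIn_iff_infix ['.'] s).1 h
          exact (hs1 ▸ hy) (this.subset (by simp))
      rw [hin]
      simp [hqs]
    · simp only [List.concat_eq_append] at hzs
      subst hzs
      have hx : '.' ∉ x := hfree x (hqs ▸ by simp)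
      have hparts2 : pvModel s [] = zs ++ [x, y] := by
        rw [hqs, List.append_assoc]; rfl
      rcases zs.eq_nil_or_concat with hznil | ⟨ps, hne⟩
      · -- two tokens: s = x ++ '.' :: y
        subst hznil
        have hs2 : s = x ++ '.' :: y := by
          rw [← hjoin, hparts2]; rfl
        have hsc : s.count '.' ≤ 1 := by
          rw [hs2, List.count_append, List.count_eq_zero.2 hx, List.count_cons_self,
            List.count_eq_zero.2 hy]
        rw [pvLoopA_none s pvSuffixesA (by decide) hsc]
        have hin : PySem.Chars.isIn ['.'] s = true := by
          rw [PySem.Chars.isIn_iff_infix]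
          exact ⟨x, y, by simp [hs2]⟩
        rw [hin, hparts2]
        have hrs : pvRsplitAux s.reverse = x := by
          rw [hs2]
          have : (x ++ '.' :: y).reverse = y.reverse ++ '.' :: x.reverse := by simp
          rw [this, pvRsplitAux_eq _ _ (by simpa using hy)]
          simp
        have hnc : ¬ (3 ≤ (([] : List (List Char)) ++ [x, y]).length ∧
            pvPairsB.contains ((PySem.List.pyGet? (([] : List (List Char)) ++ [x, y]) (-2)).getD [],
              (PySem.List.pyGet? (([] : List (List Char)) ++ [x, y]) (-1)).getD []) = true) := by
          rintro ⟨h3, _⟩; simp at h3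
        rw [if_neg hnc, if_pos (by simp), PySem.List.slice_to_neg_one,
          pvJoin_eq_intercalate, hrs]
        simp [pvJoin]
      · -- three or more tokens
        have hzs_ne : zs ≠ [] := by rcases hne with ⟨a, hh⟩; simp [hh]
        have hs3 : s = pvJoin zs ++ ('.' :: x ++ '.' :: y) := by
          rw [← hjoin, hparts2, show zs ++ [x, y] = (zs ++ [x]) ++ [y] by simp,
            pvJoin_concat _ _ (by simp [hzs_ne]), pvJoin_concat _ _ hzs_ne]
          simp
        rw [hparts2, hs3, pvSuffixesA_eq, pvLoopA_pairs _ _ _ _ hx hy hpairfree]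
        rw [pvGet_neg2, pvGet_neg1]
        simp only [Option.getD_some]
        have hlen2 : 2 ≤ (zs ++ [x, y]).length := by
          simp only [List.length_append, List.length_cons, List.length_nil]; omega
        have hlen3 : 3 ≤ (zs ++ [x, y]).length := by
          have h1 := List.length_pos_of_ne_nil hzs_ne
          simp only [List.length_append, List.length_cons, List.length_nil]; omega
        by_cases hmem : (x, y) ∈ pvPairList
        · have hcond : 3 ≤ (zs ++ [x, y]).length ∧ pvPairsB.contains (x, y) = true :=
            ⟨hlen3, (pvContains_iff x y).2 hmem⟩
          rw [if_pos hmem, if_pos hcond,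
            PySem.List.slice_to_neg_ofNat _ 2 (by omega),
            show (zs ++ [x, y]).length - 2 = zs.length by
              simp only [List.length_append, List.length_cons, List.length_nil]; omega,
            List.take_left, pvJoin_eq_intercalate]
        · rw [if_neg hmem]
          have hnc : ¬ (3 ≤ (zs ++ [x, y]).length ∧ pvPairsB.contains (x, y) = true) := by
            rintro ⟨_, hc⟩; exact hmem ((pvContains_iff x y).1 hc)
          have hin : PySem.Chars.isIn ['.'] (pvJoin zs ++ ('.' :: x ++ '.' :: y)) = true := by
            rw [PySem.Chars.isIn_iff_infix]
            exact ⟨pvJoin zs, x ++ '.' :: y, by simp⟩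
          have hrs : pvRsplitAux (pvJoin zs ++ ('.' :: x ++ '.' :: y)).reverse
              = pvJoin zs ++ '.' :: x := by
            have hrev : (pvJoin zs ++ ('.' :: x ++ '.' :: y)).reverse
                = y.reverse ++ '.' :: (pvJoin zs ++ '.' :: x).reverse := by
              simp [List.append_assoc]
            rw [hrev, pvRsplitAux_eq _ _ (by simpa using hy)]
            simp
          rw [if_neg hnc, if_pos hlen2, hin, hrs, PySem.List.slice_to_neg_one,
            show (zs ++ [x, y]).dropLast = zs ++ [x] by
              rw [show zs ++ [x, y] = (zs ++ [x]) ++ [y] by simp, List.dropLast_concat],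
            pvJoin_eq_intercalate, pvJoin_concat _ _ hzs_ne]
          simp

-- ===== VERDICT (by name: the statement is the Claim_ definition above) =====
theorem layer_block_prefix_py_spec : Claim_equal_layer_block_prefix_py := by
  intro module_name _
  unfold Spec_layer_block_prefix_py
  exact pvMain module_name
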